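-- pv_equiv track=rewrite | github.com/WinrichSy/Codewars_Solutions | Python/7kyu/PointsInSegments.py | segments
-- ===== SOURCE A (Python) =====
-- def segments(m, a):
--     seg_list = []
--     for i in a:
--         for j in range(i[0], i[1]+1):
--             seg_list.append(j)
--
--     seg_list = list(set(seg_list))
--
--     ans = []
--     m_range = [i for i in range(m+1)]
--     for i in m_range:
--         if i not in seg_list:
--             ans.append(i)
--
--     return ans
-- ===== SOURCE B (Python) =====
-- def segments(m, a):
--     # Simpler: test each point directly against the intervals instead of
--     # materializing the union of all covered points.
--     return [p for p in range(m + 1) if not any(s[0] <= p <= s[1] for s in a)]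
-- ===== Notes on version B (the rewrite author's own statement) =====
-- stated objective: simpler
-- what changed: B never materializes the covered points: instead of expanding every interval into a point list, deduplicating it and doing a linear membership scan per candidate, B filters 0..m with a direct per-point interval-containment test.
import Mathlib
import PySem

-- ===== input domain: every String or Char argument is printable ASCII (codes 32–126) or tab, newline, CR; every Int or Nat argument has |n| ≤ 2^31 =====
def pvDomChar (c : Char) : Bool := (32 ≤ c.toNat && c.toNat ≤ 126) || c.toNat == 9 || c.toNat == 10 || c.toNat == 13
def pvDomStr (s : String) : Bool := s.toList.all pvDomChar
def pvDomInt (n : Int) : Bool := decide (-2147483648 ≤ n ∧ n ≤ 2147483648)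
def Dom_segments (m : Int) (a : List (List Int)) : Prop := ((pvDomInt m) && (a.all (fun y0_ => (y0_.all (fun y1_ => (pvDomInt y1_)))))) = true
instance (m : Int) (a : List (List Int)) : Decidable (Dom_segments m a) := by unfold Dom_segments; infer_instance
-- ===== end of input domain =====

-- B replaces A's materialized, deduplicated covered-point list (and its linear
-- membership scans) with a direct per-point interval-containment test: simpler.

-- ===== PORT A =====
-- seg_list = []; for i in a: for j in range(i[0], i[1]+1): seg_list.append(j)
def segA_points (a : List (List Int)) : List Int :=
  a.foldl (fun acc i =>
    acc ++ (PySem.List.pyRange ((PySem.List.pyGet? i 0).getD 0)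
                               (((PySem.List.pyGet? i 1).getD 0) + 1) 1)) []

-- seg_list = list(set(seg_list)) (order irrelevant: the set is only used for membership);
-- ans = []; for i in range(m+1): if i not in seg_list: ans.append(i)
def segments (m : Int) (a : List (List Int)) : List Int :=
  (PySem.List.pyRange 0 (m + 1) 1).foldl
    (fun ans i => if PySem.Set.contains (PySem.Set.ofList (segA_points a)) i then ans
                  else ans ++ [i]) []

-- ===== PORT B =====
def segments_alt (m : Int) (a : List (List Int)) : List Int :=
  (PySem.List.pyRange 0 (m + 1) 1).filter (fun p =>
    !(a.any (fun s => decide ((PySem.List.pyGet? s 0).getD 0 ≤ p ∧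
                              p ≤ (PySem.List.pyGet? s 1).getD 0))))

-- ===== PRECONDITION & SPEC =====
-- Pre_ excludes sublists with fewer than two elements, on which A raises IndexError.
def Pre_segments (m : Int) (a : List (List Int)) : Prop := ∀ s ∈ a, 2 ≤ s.length
instance (m : Int) (a : List (List Int)) : Decidable (Pre_segments m a) := by
  unfold Pre_segments; infer_instance
def pvWitness_segments : Int × List (List Int) := (5, [[1, 2], [4, 4]])

def Spec_segments (m : Int) (a : List (List Int)) (out : List Int) : Prop := out = segments_alt m a
instance (m : Int) (a : List (List Int)) (out : List Int) : Decidable (Spec_segments m a out) := by unfold Spec_segments; infer_instance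

-- ===== CLAIM (what is proved, stated in full; the proofs are below) =====
def Claim_equal_segments : Prop := ∀ (m : Int) (a : List (List Int)), Dom_segments m a → Pre_segments m a → Spec_segments m a (segments m a)

-- ===== LEMMAS AND PROOFS =====

-- Loop shape: 'if p(i): skip else append' = filter by the negated test.
theorem foldl_skip_if {α : Type} (p : α → Bool) (l : List α) (acc : List α) :
    l.foldl (fun ans i => if p i then ans else ans ++ [i]) acc
      = acc ++ l.filter (fun i => !p i) := by
  induction l generalizing acc with
  | nil => simp
  | cons x l ih => by_cases h : p x <;> simp [h, ih]

-- A point p lies in A's flattened point list iff some interval of a contains it.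
theorem mem_points_iff (a : List (List Int)) (p : Int) :
    (p ∈ segA_points a) ↔
    ∃ s ∈ a, (PySem.List.pyGet? s 0).getD 0 ≤ p ∧ p ≤ (PySem.List.pyGet? s 1).getD 0 := by
  unfold segA_points
  rw [PySem.List.foldl_append_eq_flatMap]
  simp only [List.nil_append, List.mem_flatMap, PySem.List.mem_pyRange_one]
  constructor
  · rintro ⟨s, hs, h1, h2⟩; exact ⟨s, hs, h1, by omega⟩
  · rintro ⟨s, hs, h1, h2⟩; exact ⟨s, hs, h1, by omega⟩

-- ===== VERDICT (by name: the statement is the Claim_ definition above) =====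
theorem segments_spec : Claim_equal_segments := by
  intro m a _ _
  unfold Spec_segments segments segments_alt
  rw [foldl_skip_if]
  simp only [List.nil_append]
  apply List.filter_congr
  intro p _
  have h := mem_points_iff a p
  simp only [PySem.Set.contains_eq_listContains]
  by_cases hc : p ∈ segA_points a
  · have ⟨s, hs, h1, h2⟩ := h.mp hc
    have hmem : p ∈ PySem.Set.ofList (segA_points a) :=
      (PySem.Set.mem_ofList _ _).mpr hc
    simp [List.contains_eq_mem, hmem, List.any_eq_true]
    exact ⟨s, hs, h1, h2⟩
  · have hmem : p ∉ PySem.Set.ofList (segA_points a) :=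
      fun hx => hc ((PySem.Set.mem_ofList _ _).mp hx)
    simp [List.contains_eq_mem, hmem, List.any_eq_true]
    intro s hs h1
    by_contra h2
    exact hc (h.mpr ⟨s, hs, h1, by omega⟩)
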